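-- pv_equiv track=rewrite | github.com/Solaxun/CS212 | parking_lot_search.py | game_board
-- ===== SOURCE A (Python) =====
-- def game_board(state):
--     cars = set(state) - set('|.')
--     carmap = dict()
--     for ix,item in enumerate(state):
--         if item in cars:
--             if item in carmap:
--                 carmap[item].append(ix)
--             else:
--                 carmap[item] = [ix]
--     board = tuple(carmap.items())
--     return tuple(map(lambda x: tuple([x[0],tuple(x[1])]),board))
-- ===== SOURCE B (Python) =====
-- def game_board(state):
--     # Build the list of distinct car chars in first-appearance order,
--     # then collect each car's positions by a separate scan of the string.
--     order = [c for c in dict.fromkeys(state) if c not in '|.']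
--     return tuple((c, tuple(i for i, x in enumerate(state) if x == c))
--                  for c in order)
-- ===== Notes on version B (the rewrite author's own statement) =====
-- stated objective: alternative
-- what changed: Replaces the single dict-accumulating pass with an ordered dedup of the car characters followed by a per-character rescan of the string collecting positions.
import Mathlib
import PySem

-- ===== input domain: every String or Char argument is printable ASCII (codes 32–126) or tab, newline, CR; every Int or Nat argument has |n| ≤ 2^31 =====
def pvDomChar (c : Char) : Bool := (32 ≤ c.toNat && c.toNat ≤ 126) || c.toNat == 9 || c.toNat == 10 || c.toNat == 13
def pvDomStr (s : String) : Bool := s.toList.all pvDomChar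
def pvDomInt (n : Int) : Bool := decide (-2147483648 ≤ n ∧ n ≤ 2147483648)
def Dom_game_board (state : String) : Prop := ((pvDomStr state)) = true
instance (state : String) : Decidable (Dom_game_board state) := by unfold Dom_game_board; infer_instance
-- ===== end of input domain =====

-- B replaces A's single dict-accumulating pass with an ordered dedup of the car
-- characters followed by a per-character rescan collecting positions (alternative decomposition, same result).

-- ===== PORT A =====
-- port of A, the given Python
def game_board (state : String) : List (String × List Int) :=
  let cars : PySem.Set Char :=
    PySem.Set.diff (PySem.Set.ofList state.toList) (PySem.Set.ofList "|.".toList)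
  let carmap : PySem.Dict Char (List Int) :=
    (PySem.List.enumerate state.toList 0).foldl
      (fun d p =>
        if PySem.Set.contains cars p.2 then
          if d.contains p.2 then d.modify p.2 [] (fun v => v ++ [p.1])
          else d.insert p.2 [p.1]
        else d)
      PySem.Dict.empty
  carmap.items.map (fun x => (String.ofList [x.1], x.2))

-- ===== PORT B =====
def game_board_alt (state : String) : List (String × List Int) :=
  let l := state.toList
  let order := (PySem.List.dedup l).filter (fun c => !("|.".toList.contains c))
  order.map (fun c =>
    (String.ofList [c], ((PySem.List.enumerate l 0).filter (fun p => p.2 == c)).map (·.1)))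



-- ===== PRECONDITION & SPEC =====
def Spec_game_board (state : String) (out : List (String × List Int)) : Prop := out = game_board_alt state
instance (state : String) (out : List (String × List Int)) : Decidable (Spec_game_board state out) := by unfold Spec_game_board; infer_instance

-- ===== CLAIM (what is proved, stated in full; the proofs are below) =====
def Claim_equal_game_board : Prop := ∀ (state : String), Dom_game_board state → Spec_game_board state (game_board state)

-- ===== LEMMAS AND PROOFS =====
lemma pv_ofList_append {α : Type} [BEq α] (l : List α) (x : α) :
    PySem.Set.ofList (l ++ [x]) = PySem.Set.add (PySem.Set.ofList l) x := by
  simp [PySem.Set.ofList_eq_foldl, List.foldl_append]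

-- ordered dedup commutes with filter
lemma pv_ofList_filter {α : Type} [BEq α] [LawfulBEq α] (P : α → Bool) (l : List α) :
    PySem.Set.ofList (l.filter P) = (PySem.Set.ofList l).filter P := by
  induction l using List.reverseRecOn with
  | nil => rfl
  | append_singleton l x ih =>
    rw [List.filter_append, List.filter_singleton, pv_ofList_append]
    cases hP : P x with
    | false =>
      simp only [cond_false, List.append_nil, PySem.Set.add]
      split
      · exact ih
      · simp [List.filter_append, hP, ih]
    | true =>
      simp only [cond_true, pv_ofList_append, PySem.Set.add, PySem.Set.contains]
      have hmem : List.contains (PySem.Set.ofList (List.filter P l)) x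
          = List.contains (PySem.Set.ofList l) x := by
        by_cases hx : x ∈ l
        · simp [PySem.Set.mem_ofList, List.mem_filter, hx, hP]
        · simp [PySem.Set.mem_ofList, List.mem_filter, hx]
      simp only [hmem]
      split
      · exact ih
      · simp [List.filter_append, hP, ih]


-- ===== VERDICT (by name: the statement is the Claim_ definition above) =====
theorem game_board_spec : Claim_equal_game_board := by
  intro state _
  unfold Spec_game_board game_board game_board_alt
  simp only []
  set l := state.toList with hl
  set cars : PySem.Set Char :=
    PySem.Set.diff (PySem.Set.ofList l) (PySem.Set.ofList "|.".toList) with hcars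
  -- collapse the two dict-update branches into one modify
  have hbody : (fun (d : PySem.Dict Char (List Int)) (p : Int × Char) =>
      if PySem.Set.contains cars p.2 then
        if d.contains p.2 then d.modify p.2 [] (fun v => v ++ [p.1])
        else d.insert p.2 [p.1]
      else d)
      = fun d p => if PySem.Set.contains cars p.2 then d.modify p.2 [] (fun v => v ++ [p.1]) else d := by
    funext d p
    by_cases h : d.contains p.2 = true
    · simp [h]
    · simp only [Bool.not_eq_true] at h
      simp [h, PySem.Dict.modify, PySem.Dict.getD_of_not_contains d [] h]
  rw [hbody, PySem.List.foldl_if_eq_foldl_filter]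
  set F := (PySem.List.enumerate l 0).filter (fun p => PySem.Set.contains cars p.2) with hF
  set carmap := F.foldl (fun d p => d.modify p.2 [] (fun v => v ++ [p.1])) PySem.Dict.empty with hcm
  have hkeys : carmap.keys = PySem.Set.ofList (F.map (·.2)) := by
    rw [hcm, PySem.Dict.keys_foldl_modify_key F (fun p => p.2) [] (fun _ p v => v ++ [p.1])]
    rfl
  have hnd : carmap.keys.Nodup := by
    rw [hcm]
    exact PySem.Dict.nodup_keys_foldl_modify_key F (fun p => p.2) [] (fun _ p v => v ++ [p.1])
      PySem.Dict.empty (by simp)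
  have hgetD : ∀ c, carmap.getD c [] = (F.filter (fun p => p.2 == c)).map (·.1) := by
    intro c
    have hswap : carmap = (F.map Prod.swap).foldl
        (fun d p => d.modify p.1 [] (fun v => v ++ [p.2])) PySem.Dict.empty := by
      rw [hcm, List.foldl_map]
      rfl
    rw [hswap, PySem.Dict.getD_foldl_modify_append]
    simp [List.filter_map, List.map_map, Function.comp_def, Prod.swap]
  have hFsnd : F.map (·.2) = l.filter (fun c => PySem.Set.contains cars c) := by
    rw [hF, show (fun p : Int × Char => PySem.Set.contains cars p.2)
        = ((fun c => PySem.Set.contains cars c) ∘ (fun p : Int × Char => p.2)) from rfl,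
      ← List.filter_map, PySem.List.map_snd_enumerate]
  have hcarsmem : ∀ c ∈ l, PySem.Set.contains cars c = !("|.".toList.contains c) := by
    intro c hc
    rw [hcars]
    by_cases hb : c ∈ ("|.".toList)
    · have hb' : c = '|' ∨ c = '.' := by simpa using hb
      rcases hb' with h | h <;>
        simp [PySem.Set.contains, PySem.Set.diff, List.mem_filter, PySem.Set.mem_ofList, h]
    · simp [PySem.Set.contains, PySem.Set.diff, List.mem_filter, PySem.Set.mem_ofList, hc]
  rw [PySem.Dict.items_eq_map_keys carmap hnd [], hkeys, hFsnd, pv_ofList_filter,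
    PySem.List.dedup_eq_ofList, List.map_map]
  rw [List.filter_congr (fun c hc => hcarsmem c ((PySem.Set.mem_ofList l c).mp hc))]
  apply List.map_congr_left
  intro c hc
  have hcl : c ∈ l ∧ ¬ c ∈ ("|.".toList) := by
    have := List.mem_filter.mp hc
    exact ⟨(PySem.Set.mem_ofList l c).mp this.1, by simpa using this.2⟩
  have hcc : PySem.Set.contains cars c = true := by
    rw [hcarsmem c hcl.1]; simpa using hcl.2
  simp only [Function.comp_def]
  refine congrArg _ ?_
  rw [hgetD c, hF, List.filter_filter]
  refine congrArg _ (List.filter_congr ?_)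
  intro p _
  by_cases hpc : p.2 = c
  · have hm : c ∈ cars := by
      simpa [PySem.Set.contains, List.contains_iff_mem] using hcc
    simp [hpc, hm]
  · simp [hpc]
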